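-- pv_equiv track=rewrite | github.com/tanmaydesai07/odyssey | agent/zen_model.py | _is_string_terminated
-- ===== SOURCE A (Python) =====
-- def _is_string_terminated(line: str) -> bool:
--     """Return True if all string literals on the line are properly closed."""
--     in_single = False
--     in_double = False
--     i = 0
--     while i < len(line):
--         c = line[i]
--         if c == '\\' and i + 1 < len(line):
--             i += 2
--             continue
--         if c == "'" and not in_double:
--             in_single = not in_single
--         elif c == '"' and not in_single:
--             in_double = not in_double
--         i += 1
--     return not in_single and not in_double
-- ===== SOURCE B (Python) =====
-- def _is_string_terminated(line: str) -> bool: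
--     """Return True if all string literals on the line are properly closed."""
--     n = len(line)
--     i = 0
--     while i < n:
--         c = line[i]
--         if c == '\\' and i + 1 < n:
--             i += 2
--         elif c in ('\'', '"'):
--             # consume one complete string literal delimited by c
--             i += 1
--             while i < n and line[i] != c:
--                 if line[i] == '\\' and i + 1 < n:
--                     i += 2
--                 else:
--                     i += 1
--             if i >= n:
--                 return False  # literal never closed
--             i += 1  # step past the closing quote
--         else:
--             i += 1
--     return True
-- ===== Notes on version B (the rewrite author's own statement) =====
-- stated objective: alternative
-- what changed: Replaces A's single scan with two toggled quote-state booleans by a tokenizer: an outer loop over plain text that, on meeting a quote, runs an inner loop consuming the whole string literal and returns False early if it never closes; no quote-state flags are kept.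
import Mathlib
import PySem

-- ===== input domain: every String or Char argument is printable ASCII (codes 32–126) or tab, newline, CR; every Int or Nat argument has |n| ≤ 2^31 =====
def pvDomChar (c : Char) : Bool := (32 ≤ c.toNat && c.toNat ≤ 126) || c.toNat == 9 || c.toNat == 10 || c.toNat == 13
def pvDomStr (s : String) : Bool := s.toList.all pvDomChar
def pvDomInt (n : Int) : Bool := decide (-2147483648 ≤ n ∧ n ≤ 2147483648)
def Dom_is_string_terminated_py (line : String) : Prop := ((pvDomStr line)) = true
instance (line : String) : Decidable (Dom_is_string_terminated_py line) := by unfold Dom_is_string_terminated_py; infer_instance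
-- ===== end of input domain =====

-- B replaces A's toggled quote-state booleans by a tokenizer (outer loop over plain text,
-- inner loop consuming one whole string literal, early False if it never closes): an
-- alternative decomposition of the same linear scan.
-- ===== PORT A =====
-- A's `while i < len(line)` with in_single/in_double toggles and i += 2 on an escaping
-- backslash, as recursion on the remaining characters (skip 2 = drop head and tail's head).
def isTermLoopA : List Char -> Bool -> Bool -> Bool
  | [], in_single, in_double => !in_single && !in_double
  | c :: rest, in_single, in_double =>
    if c = '\\' ∧ rest ≠ [] then
      isTermLoopA rest.tail in_single in_double
    else if c = '\'' ∧ in_double = false then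
      isTermLoopA rest (!in_single) in_double
    else if c = '"' ∧ in_single = false then
      isTermLoopA rest in_single (!in_double)
    else
      isTermLoopA rest in_single in_double
  termination_by l _ _ => l.length
  decreasing_by
  · simp only [List.length_cons]
    exact Nat.lt_succ_of_le (by rw [List.length_tail]; omega)
  · simp
  · simp
  · simp

def is_string_terminated_py (line : String) : Bool :=
  isTermLoopA line.toList false false

-- ===== PORT B =====
-- B's inner `while i < n and line[i] != c` loop: consume one string literal delimited by q;
-- `some rest` = characters after the closing quote, `none` = the inner loop ran off the end
-- (B then returns False).
def consumeLitB (q : Char) : List Char -> Option (List Char)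
  | [] => none
  | c :: rest =>
    if c = q then some rest
    else if c = '\\' ∧ rest ≠ [] then consumeLitB q rest.tail
    else consumeLitB q rest
  termination_by l => l.length
  decreasing_by
  · simp only [List.length_cons]
    exact Nat.lt_succ_of_le (by rw [List.length_tail]; omega)
  · simp

-- needed only for outerLoopB's termination: a consumed literal is a strict suffix
theorem consumeLitB_length : ∀ (n : Nat) (q : Char) (l r : List Char), l.length ≤ n →
    consumeLitB q l = some r → r.length < l.length := by
  intro n
  induction n with
  | zero =>
    intro q l r h hc
    have : l = [] := List.eq_nil_of_length_eq_zero (Nat.le_zero.mp h)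
    subst this; simp [consumeLitB] at hc
  | succ n ih =>
    intro q l r h hc
    match l with
    | [] => simp [consumeLitB] at hc
    | c :: rest =>
      have h' : rest.length ≤ n := by simp at h; omega
      rw [consumeLitB] at hc
      split_ifs at hc with h1 h2
      · cases hc; simp
      · have h'' : rest.tail.length ≤ n := by rw [List.length_tail]; omega
        have := ih q rest.tail r h'' hc
        simp only [List.length_cons]
        rw [List.length_tail] at this; omega
      · have := ih q rest r h' hc
        simp only [List.length_cons]; omega

-- B's outer while loop over the plain (non-literal) text.
def outerLoopB : List Char -> Bool
  | [] => true
  | c :: rest =>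
    if c = '\\' ∧ rest ≠ [] then
      outerLoopB rest.tail
    else if c = '\'' ∨ c = '"' then
      match h : consumeLitB c rest with
      | none => false
      | some rest' => outerLoopB rest'
    else
      outerLoopB rest
  termination_by l => l.length
  decreasing_by
  · simp only [List.length_cons]
    exact Nat.lt_succ_of_le (by rw [List.length_tail]; omega)
  · simp only [List.length_cons]
    exact Nat.lt_succ_of_lt (consumeLitB_length rest.length c rest rest' (le_refl _) h)
  · simp

def is_string_terminated_py_alt (line : String) : Bool :=
  outerLoopB line.toList

-- ===== PRECONDITION & SPEC =====
def Spec_is_string_terminated_py (line : String) (out : Bool) : Prop := out = is_string_terminated_py_alt line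
instance (line : String) (out : Bool) : Decidable (Spec_is_string_terminated_py line out) := by unfold Spec_is_string_terminated_py; infer_instance

-- ===== CLAIM (what is proved, stated in full; the proofs are below) =====
def Claim_equal_is_string_terminated_py : Prop := ∀ (line : String), Dom_is_string_terminated_py line → Spec_is_string_terminated_py line (is_string_terminated_py line)

-- ===== LEMMAS AND PROOFS =====
-- Turn outerLoopB's dependent match (needed for termination) into a plain match.
theorem outerLoopB_quote (c : Char) (rest : List Char) (h1 : ¬(c = '\\' ∧ rest ≠ []))
    (h2 : c = '\'' ∨ c = '"') :
    outerLoopB (c :: rest) =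
      match consumeLitB c rest with | none => false | some r => outerLoopB r := by
  rw [outerLoopB, if_neg h1, if_pos h2]
  rcases he : consumeLitB c rest with _ | r <;> simp

-- A's three reachable states (plain, in_single, in_double) versus B's two modes
-- (outer loop / literal consumption), by strong induction on the length.
theorem loopA_eq_B : ∀ (n : Nat) (l : List Char), l.length ≤ n →
    (isTermLoopA l false false = outerLoopB l) ∧
    (isTermLoopA l true false =
      (match consumeLitB '\'' l with | none => false | some r => outerLoopB r)) ∧
    (isTermLoopA l false true =
      (match consumeLitB '"' l with | none => false | some r => outerLoopB r)) := by
  intro n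
  induction n with
  | zero =>
    intro l h
    have : l = [] := List.eq_nil_of_length_eq_zero (Nat.le_zero.mp h)
    subst this
    simp [isTermLoopA, outerLoopB, consumeLitB]
  | succ n ih =>
    intro l h
    match l with
    | [] => simp [isTermLoopA, outerLoopB, consumeLitB]
    | c :: rest =>
      have hrest : rest.length ≤ n := by simp at h; omega
      have htail : rest.tail.length ≤ n := by rw [List.length_tail]; omega
      by_cases hb : c = '\\' ∧ rest ≠ []
      · -- escaping backslash: A and B's both modes skip two characters
        obtain ⟨ta, tb, tc⟩ := ih rest.tail htail
        refine ⟨?_, ?_, ?_⟩ <;>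
          rw [isTermLoopA, if_pos hb]
        · rw [outerLoopB, if_pos hb]; exact ta
        · rw [consumeLitB, if_neg (by simp [hb.1]), if_pos hb]; exact tb
        · rw [consumeLitB, if_neg (by simp [hb.1]), if_pos hb]; exact tc
      · obtain ⟨ha, hsq, hdq⟩ := ih rest hrest
        by_cases hq1 : c = '\''
        · subst hq1
          have hne : ¬('\'' = '\\' ∧ rest ≠ []) := by simp
          refine ⟨?_, ?_, ?_⟩
          · -- open a single-quoted literal
            rw [show isTermLoopA ('\'' :: rest) false false = isTermLoopA rest true false from
                  by rw [isTermLoopA]; simp,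
                outerLoopB_quote _ _ hne (Or.inl rfl)]
            exact hsq
          · -- close the single-quoted literal
            have hc : consumeLitB '\'' ('\'' :: rest) = some rest := by
              rw [consumeLitB.eq_def]; simp
            rw [show isTermLoopA ('\'' :: rest) true false = isTermLoopA rest false false from
                  by rw [isTermLoopA]; simp,
                hc]
            exact ha
          · -- single quote inside a double-quoted literal: plain character
            rw [show isTermLoopA ('\'' :: rest) false true = isTermLoopA rest false true from
                  by rw [isTermLoopA]; simp,
                consumeLitB, if_neg (by decide), if_neg hne]
            exact hdq
        by_cases hq2 : c = '"'
        · subst hq2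
          have hne : ¬('"' = '\\' ∧ rest ≠ []) := by simp
          refine ⟨?_, ?_, ?_⟩
          · rw [show isTermLoopA ('"' :: rest) false false = isTermLoopA rest false true from
                  by rw [isTermLoopA]; simp,
                outerLoopB_quote _ _ hne (Or.inr rfl)]
            exact hdq
          · have hc : consumeLitB '\'' ('"' :: rest) = consumeLitB '\'' rest := by
              rw [consumeLitB.eq_def]; simp
            rw [show isTermLoopA ('"' :: rest) true false = isTermLoopA rest true false from
                  by rw [isTermLoopA]; simp,
                hc]
            exact hsq
          · rw [show isTermLoopA ('"' :: rest) false true = isTermLoopA rest false false from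
                  by rw [isTermLoopA]; simp,
                consumeLitB, if_pos rfl]
            exact ha
        · -- ordinary character: every mode just advances
          refine ⟨?_, ?_, ?_⟩ <;>
            rw [isTermLoopA, if_neg hb, if_neg (by simp [hq1]), if_neg (by simp [hq2])]
          · rw [outerLoopB, if_neg hb, if_neg (by simp [hq1, hq2])]; exact ha
          · rw [consumeLitB, if_neg hq1, if_neg hb]; exact hsq
          · rw [consumeLitB, if_neg hq2, if_neg hb]; exact hdq

-- ===== VERDICT (by name: the statement is the Claim_ definition above) =====
theorem is_string_terminated_py_spec : Claim_equal_is_string_terminated_py := by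
  intro line _
  unfold Spec_is_string_terminated_py is_string_terminated_py is_string_terminated_py_alt
  exact (loopA_eq_B line.toList.length line.toList (le_refl _)).1
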